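-- pv_equiv track=rewrite | github.com/ramabarreto/Determinar-el-mejor-vendedor | VENDEDORES PARCIAL.py | sumames
-- ===== SOURCE A (Python) =====
-- meses = 12
--
-- def sumames(mat, f):
--     mesmayor = [0]
--     r = 0
--     for i in range(1, meses + 1):
--         r = 0
--         for j in range (1, f + 1):
--             r = mat[j][i] + r
--         mesmayor.append(r)
--     return(mesmayor)
-- ===== SOURCE B (Python) =====
-- meses = 12
--
-- def sumames(mat, f):
--     tot = [0] * meses
--     for j in range(1, f + 1):
--         row = mat[j]
--         tot = [t + row[i] for t, i in zip(tot, range(1, meses + 1))]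
--     return [0] + tot
-- ===== Notes on version B (the rewrite author's own statement) =====
-- stated objective: alternative
-- what changed: Single row-major pass over mat: the loop nesting is swapped (rows outer) and a 12-element vector of running month totals is rebuilt per row via zip, instead of computing each month's column sum in isolation with a scalar accumulator.
import Mathlib
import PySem

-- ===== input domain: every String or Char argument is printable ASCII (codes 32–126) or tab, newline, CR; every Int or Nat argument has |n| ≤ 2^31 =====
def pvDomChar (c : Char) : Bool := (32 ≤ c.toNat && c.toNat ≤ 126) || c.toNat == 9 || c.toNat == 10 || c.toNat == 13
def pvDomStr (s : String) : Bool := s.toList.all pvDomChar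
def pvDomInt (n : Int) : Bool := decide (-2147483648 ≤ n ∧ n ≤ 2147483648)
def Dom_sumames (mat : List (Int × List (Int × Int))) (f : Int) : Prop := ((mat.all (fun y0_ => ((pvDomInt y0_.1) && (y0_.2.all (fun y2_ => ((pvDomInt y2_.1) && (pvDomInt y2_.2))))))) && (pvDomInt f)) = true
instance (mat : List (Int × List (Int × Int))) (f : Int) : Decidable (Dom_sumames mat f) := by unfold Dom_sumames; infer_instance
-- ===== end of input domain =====

-- B makes a single row-major pass keeping a 12-vector of running month totals (loop nesting
-- swapped, vector state instead of one scalar per column); same cost, different decomposition.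

def meses : Int := 12

-- ===== PORT A =====
-- mat[j][i] on the dicts, ported as getD (the defaults are unreachable under Pre_sumames)
def sumames (mat : List (Int × List (Int × Int))) (f : Int) : List Int :=
  (PySem.List.pyRange 1 (meses + 1) 1).foldl
    (fun mesmayor i =>
      mesmayor ++ [(PySem.List.pyRange 1 (f + 1) 1).foldl
        (fun r j => (PySem.Dict.mk ((PySem.Dict.mk mat).getD j [])).getD i 0 + r) 0])
    [0]

-- ===== PORT B =====
def sumames_alt (mat : List (Int × List (Int × Int))) (f : Int) : List Int :=
  let tot := (PySem.List.pyRange 1 (f + 1) 1).foldl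
    (fun tot j =>
      let row := (PySem.Dict.mk mat).getD j []
      (tot.zip (PySem.List.pyRange 1 (meses + 1) 1)).map
        (fun ti => ti.1 + (PySem.Dict.mk row).getD ti.2 0))
    (List.replicate 12 0)   -- [0] * meses
  [0] ++ tot

-- ===== PRECONDITION & SPEC =====
-- Pre_: every row key 1..f is present in mat and every such row has keys 1..12
-- (otherwise the Python raises KeyError). The guard f ≤ len mat is implied by that
-- requirement (f distinct keys must all occur in mat), so it excludes nothing; it only
-- keeps the decision procedure from materializing a huge range when f is large.
def Pre_sumames (mat : List (Int × List (Int × Int))) (f : Int) : Prop :=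
  (if f ≤ PySem.List.len mat then
    (PySem.List.pyRange 1 (f + 1) 1).all (fun j =>
      match (PySem.Dict.mk mat).get? j with
      | some row => (PySem.List.pyRange 1 13 1).all (fun i => ((PySem.Dict.mk row).get? i).isSome)
      | none => false)
   else false) = true
instance (mat : List (Int × List (Int × Int))) (f : Int) : Decidable (Pre_sumames mat f) := by
  unfold Pre_sumames; infer_instance

def pvWitness_sumames : (List (Int × List (Int × Int))) × Int :=
  ([(1, [(1, 5), (2, 0), (3, 1), (4, 0), (5, 2), (6, 0), (7, 0), (8, 3), (9, 0), (10, 0), (11, 0), (12, 7)])], 1)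

def Spec_sumames (mat : List (Int × List (Int × Int))) (f : Int) (out : List Int) : Prop := out = sumames_alt mat f
instance (mat : List (Int × List (Int × Int))) (f : Int) (out : List Int) : Decidable (Spec_sumames mat f out) := by unfold Spec_sumames; infer_instance

-- ===== CLAIM (what is proved, stated in full; the proofs are below) =====
def Claim_equal_sumames : Prop := ∀ (mat : List (Int × List (Int × Int))) (f : Int), Dom_sumames mat f → Pre_sumames mat f → Spec_sumames mat f (sumames mat f)

-- ===== LEMMAS AND PROOFS =====

-- A's inner loop 'r = mat[j][i] + r' sums the column (prepends, but Int addition commutes).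
theorem foldl_add_rev (g : Int → Int) (xs : List Int) (a : Int) :
    xs.foldl (fun r j => g j + r) a = (xs.map g).sum + a := by
  induction xs generalizing a with
  | nil => simp
  | cons x xs ih => simp [List.foldl_cons, ih]; ring

theorem zip_map_self {α β : Type} (t : α → β) (cols : List α) :
    (cols.map t).zip cols = cols.map (fun a => (t a, a)) := by
  simpa using List.zip_map' (f := t) (g := id) (l := cols)

-- one row step of B rewrites the totals vector pointwise
theorem rowstep (cols : List Int) (t h : Int → Int) :
    ((cols.map t).zip cols).map (fun p => p.1 + h p.2) = cols.map (fun i => t i + h i) := by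
  rw [zip_map_self, List.map_map]; rfl

-- B's row fold accumulates, per column i, the sum of g j i over the rows
theorem mainfold (rows : List Int) (cols : List Int) (g : Int → Int → Int) (t : Int → Int) :
    rows.foldl (fun tot j => (tot.zip cols).map (fun p => p.1 + g j p.2)) (cols.map t)
      = cols.map (fun i => t i + (rows.map (fun j => g j i)).sum) := by
  induction rows generalizing t with
  | nil => simp
  | cons j rows ih =>
    simp only [List.foldl_cons]
    rw [rowstep cols t (g j), ih (fun i => t i + g j i)]
    refine List.map_congr_left (fun i _ => ?_)
    simp [List.sum_cons]; ring

-- ===== VERDICT (by name: the statement is the Claim_ definition above) =====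
theorem sumames_spec : Claim_equal_sumames := by
  intro mat f _ _
  unfold Spec_sumames sumames sumames_alt
  rw [PySem.List.foldl_append_singleton_eq_map]
  have hrep : (List.replicate 12 (0 : Int))
      = (PySem.List.pyRange 1 (meses + 1) 1).map (fun _ => 0) := by decide
  rw [hrep,
    mainfold (PySem.List.pyRange 1 (f + 1) 1) (PySem.List.pyRange 1 (meses + 1) 1)
      (fun j i => (PySem.Dict.mk ((PySem.Dict.mk mat).getD j [])).getD i 0) (fun _ => 0)]
  simp only [foldl_add_rev]
  refine congrArg ([0] ++ ·) (List.map_congr_left (fun i _ => ?_))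
  ring
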